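-- pv_equiv track=rewrite | github.com/arko-14/desysflow-oss | agents/report_generator.py | _responsibility_for
-- ===== SOURCE A (Python) =====
-- def _responsibility_for(name: str) -> str:
--     low = name.lower()
--     if "gateway" in low or "ingress" in low:
--         return "Terminates inbound traffic, applies routing, and enforces edge policies."
--     if "auth" in low:
--         return "Handles identity, authentication, and authorization decisions."
--     if any(token in low for token in ["postgres", "mysql", "mongo", "db", "database", "dynamo", "cassandra"]):
--         return "Persists system-of-record data for transactional and analytical workloads."
--     if any(token in low for token in ["redis", "cache", "memcached"]):
--         return "Caches hot data and reduces latency for repeated reads."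
--     if any(token in low for token in ["kafka", "queue", "stream", "sqs", "pubsub", "rabbitmq"]):
--         return "Buffers asynchronous work and decouples producers from consumers."
--     if any(token in low for token in ["worker", "processor", "consumer"]):
--         return "Processes background jobs and long-running workflows."
--     return "Implements core application logic and coordinates downstream dependencies."
-- ===== SOURCE B (Python) =====
-- # B: instead of an ordered chain of substring-membership tests, scan the lowered
-- # name position by position (a hand-rolled multi-pattern anchored search) and keep
-- # the minimum priority of any keyword that starts at some position; the minimum
-- # priority equals the first matching rule of A's chain, so the answer is a table
-- # lookup by that priority.
--
-- _TOKEN_PRIORITY = {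
--     "gateway": 0, "ingress": 0,
--     "auth": 1,
--     "postgres": 2, "mysql": 2, "mongo": 2, "db": 2, "database": 2, "dynamo": 2, "cassandra": 2,
--     "redis": 3, "cache": 3, "memcached": 3,
--     "kafka": 4, "queue": 4, "stream": 4, "sqs": 4, "pubsub": 4, "rabbitmq": 4,
--     "worker": 5, "processor": 5, "consumer": 5,
-- }
--
-- _DESCRIPTIONS = [
--     "Terminates inbound traffic, applies routing, and enforces edge policies.",
--     "Handles identity, authentication, and authorization decisions.",
--     "Persists system-of-record data for transactional and analytical workloads.",
--     "Caches hot data and reduces latency for repeated reads.",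
--     "Buffers asynchronous work and decouples producers from consumers.",
--     "Processes background jobs and long-running workflows.",
--     "Implements core application logic and coordinates downstream dependencies.",
-- ]
--
--
-- def _responsibility_for(name: str) -> str:
--     low = name.lower()
--     best = 6
--     for i in range(len(low)):
--         for token, pr in _TOKEN_PRIORITY.items():
--             if pr < best and low.startswith(token, i):
--                 best = pr
--     return _DESCRIPTIONS[best]
-- ===== Notes on version B (the rewrite author's own statement) =====
-- stated objective: alternative
-- what changed: Replaces the ordered chain of substring-membership tests with a position-anchored multi-pattern scan: one pass over the lowered name keeps the minimum priority of any keyword starting at each position, then a table lookup by that priority (first matching rule = minimum priority of all matches).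
import Mathlib
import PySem

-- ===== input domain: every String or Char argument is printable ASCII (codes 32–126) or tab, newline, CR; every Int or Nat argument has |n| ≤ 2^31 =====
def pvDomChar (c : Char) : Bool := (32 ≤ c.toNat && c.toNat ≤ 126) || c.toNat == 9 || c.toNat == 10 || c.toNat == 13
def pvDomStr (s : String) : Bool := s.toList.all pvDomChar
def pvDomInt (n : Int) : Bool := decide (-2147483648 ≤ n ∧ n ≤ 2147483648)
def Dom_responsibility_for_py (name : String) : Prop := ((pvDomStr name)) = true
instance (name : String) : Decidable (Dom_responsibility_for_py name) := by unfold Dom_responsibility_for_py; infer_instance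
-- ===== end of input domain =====

-- B replaces A's ordered chain of substring-membership tests by a position-anchored
-- multi-pattern scan keeping the minimum priority of any keyword match (objective: alternative).

-- ===== PORT A =====
def responsibility_for_py (name : String) : String :=
  let low := PySem.Str.lower name
  if PySem.Str.isIn "gateway" low || PySem.Str.isIn "ingress" low then
    "Terminates inbound traffic, applies routing, and enforces edge policies."
  else if PySem.Str.isIn "auth" low then
    "Handles identity, authentication, and authorization decisions."
  else if ["postgres", "mysql", "mongo", "db", "database", "dynamo", "cassandra"].any (fun token => PySem.Str.isIn token low) then
    "Persists system-of-record data for transactional and analytical workloads."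
  else if ["redis", "cache", "memcached"].any (fun token => PySem.Str.isIn token low) then
    "Caches hot data and reduces latency for repeated reads."
  else if ["kafka", "queue", "stream", "sqs", "pubsub", "rabbitmq"].any (fun token => PySem.Str.isIn token low) then
    "Buffers asynchronous work and decouples producers from consumers."
  else if ["worker", "processor", "consumer"].any (fun token => PySem.Str.isIn token low) then
    "Processes background jobs and long-running workflows."
  else
    "Implements core application logic and coordinates downstream dependencies."

-- ===== PORT B =====
-- _TOKEN_PRIORITY.items() as an association list (insertion order)
def pvTokenPriority : List (String × Int) :=
  [("gateway", 0), ("ingress", 0),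
   ("auth", 1),
   ("postgres", 2), ("mysql", 2), ("mongo", 2), ("db", 2), ("database", 2), ("dynamo", 2), ("cassandra", 2),
   ("redis", 3), ("cache", 3), ("memcached", 3),
   ("kafka", 4), ("queue", 4), ("stream", 4), ("sqs", 4), ("pubsub", 4), ("rabbitmq", 4),
   ("worker", 5), ("processor", 5), ("consumer", 5)]

def pvDescriptions : List String :=
  ["Terminates inbound traffic, applies routing, and enforces edge policies.",
   "Handles identity, authentication, and authorization decisions.",
   "Persists system-of-record data for transactional and analytical workloads.",
   "Caches hot data and reduces latency for repeated reads.",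
   "Buffers asynchronous work and decouples producers from consumers.",
   "Processes background jobs and long-running workflows.",
   "Implements core application logic and coordinates downstream dependencies."]

-- low.startswith(token, i): ported by hand, exact for 0 ≤ i (all i here come from range(len(low)))
def pvStartsAt (low : List Char) (i : Int) (token : String) : Bool :=
  PySem.Chars.startswith (low.drop i.toNat) token.toList

-- the 'for token, pr in _TOKEN_PRIORITY.items(): if pr < best and low.startswith(token, i): best = pr' inner loop
def pvScanAt (low : List Char) (i : Int) (best : Int) : Int :=
  pvTokenPriority.foldl
    (fun best tp => if tp.2 < best ∧ pvStartsAt low i tp.1 = true then tp.2 else best) best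

def responsibility_for_py_alt (name : String) : String :=
  let low := PySem.Str.lower name
  let best := (PySem.List.pyRange 0 (PySem.Str.len low) 1).foldl (fun best i => pvScanAt low.toList i best) 6
  PySem.List.pyGetD pvDescriptions best ""

-- ===== PRECONDITION & SPEC =====
def Spec_responsibility_for_py (name : String) (out : String) : Prop := out = responsibility_for_py_alt name
instance (name : String) (out : String) : Decidable (Spec_responsibility_for_py name out) := by unfold Spec_responsibility_for_py; infer_instance

-- ===== CLAIM (what is proved, stated in full; the proofs are below) =====
def Claim_equal_responsibility_for_py : Prop := ∀ (name : String), Dom_responsibility_for_py name → Spec_responsibility_for_py name (responsibility_for_py name)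

-- ===== LEMMAS AND PROOFS =====

-- the inner loop over an arbitrary token list never increases best
theorem pvInnerFold_le (low : List Char) (i : Int) (toks : List (String × Int)) (b : Int) :
    toks.foldl (fun best tp => if tp.2 < best ∧ pvStartsAt low i tp.1 = true then tp.2 else best) b ≤ b := by
  induction toks generalizing b with
  | nil => exact le_refl b
  | cons tp rest ih =>
      simp only [List.foldl_cons]
      refine le_trans (ih _) ?_
      split_ifs with h
      · omega
      · exact le_refl b

-- a matching token bounds the inner loop's result
theorem pvInnerFold_le_of_match (low : List Char) (i : Int) (toks : List (String × Int)) (b : Int)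
    {t : String} {p : Int} (hmem : (t, p) ∈ toks) (hsw : pvStartsAt low i t = true) :
    toks.foldl (fun best tp => if tp.2 < best ∧ pvStartsAt low i tp.1 = true then tp.2 else best) b ≤ p := by
  induction toks generalizing b with
  | nil => cases hmem
  | cons tp rest ih =>
      simp only [List.foldl_cons]
      rcases List.mem_cons.mp hmem with h | h
      · subst h
        refine le_trans (pvInnerFold_le low i rest _) ?_
        simp only [hsw, and_true]
        split_ifs with h
        · exact le_refl p
        · omega
      · exact ih _ h

-- lower bound: if every matching token's priority is ≥ k and k ≤ b, the inner loop stays ≥ k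
theorem pvInnerFold_ge (low : List Char) (i : Int) (toks : List (String × Int)) (b : Int) (k : Int)
    (hb : k ≤ b) (h : ∀ t p, (t, p) ∈ toks → pvStartsAt low i t = true → k ≤ p) :
    k ≤ toks.foldl (fun best tp => if tp.2 < best ∧ pvStartsAt low i tp.1 = true then tp.2 else best) b := by
  induction toks generalizing b with
  | nil => exact hb
  | cons tp rest ih =>
      simp only [List.foldl_cons]
      refine ih _ ?_ (fun t p hm hs => h t p (List.mem_cons_of_mem _ hm) hs)
      split_ifs with hc
      · exact h tp.1 tp.2 (List.mem_cons_self) hc.2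
      · exact hb

theorem pvScanAt_le (low : List Char) (i : Int) (b : Int) : pvScanAt low i b ≤ b :=
  pvInnerFold_le low i pvTokenPriority b

theorem pvScanAt_le_of_match (low : List Char) (i : Int) (b : Int) {t : String} {p : Int}
    (hmem : (t, p) ∈ pvTokenPriority) (hsw : pvStartsAt low i t = true) : pvScanAt low i b ≤ p :=
  pvInnerFold_le_of_match low i pvTokenPriority b hmem hsw

theorem pvScanAt_ge (low : List Char) (i : Int) (b : Int) (k : Int) (hb : k ≤ b)
    (h : ∀ t p, (t, p) ∈ pvTokenPriority → pvStartsAt low i t = true → k ≤ p) :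
    k ≤ pvScanAt low i b :=
  pvInnerFold_ge low i pvTokenPriority b k hb h

-- outer loop never increases best
theorem pvOuter_le (low : List Char) (R : List Int) (b : Int) :
    R.foldl (fun best i => pvScanAt low i best) b ≤ b := by
  induction R generalizing b with
  | nil => exact le_refl b
  | cons i rest ih =>
      simp only [List.foldl_cons]
      exact le_trans (ih _) (pvScanAt_le low i b)

-- a match anywhere in the scanned range bounds the final best
theorem pvOuter_le_of_match (low : List Char) (R : List Int) (b : Int) {i : Int} {t : String} {p : Int}
    (hi : i ∈ R) (hmem : (t, p) ∈ pvTokenPriority) (hsw : pvStartsAt low i t = true) :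
    R.foldl (fun best i => pvScanAt low i best) b ≤ p := by
  induction R generalizing b with
  | nil => cases hi
  | cons j rest ih =>
      simp only [List.foldl_cons]
      rcases List.mem_cons.mp hi with h | h
      · subst h
        exact le_trans (pvOuter_le low rest _) (pvScanAt_le_of_match low i b hmem hsw)
      · exact ih _ h

-- lower bound for the outer loop
theorem pvOuter_ge (low : List Char) (R : List Int) (b : Int) (k : Int) (hb : k ≤ b)
    (h : ∀ i ∈ R, ∀ t p, (t, p) ∈ pvTokenPriority → pvStartsAt low i t = true → k ≤ p) :
    k ≤ R.foldl (fun best i => pvScanAt low i best) b := by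
  induction R generalizing b with
  | nil => exact hb
  | cons j rest ih =>
      simp only [List.foldl_cons]
      exact ih _ (pvScanAt_ge low j b k hb (h j (List.mem_cons_self)))
        (fun i hi t p hm hs => h i (List.mem_cons_of_mem _ hi) t p hm hs)

-- a match at a scanned position means the token occurs in low
theorem pvIsIn_of_startsAt (low : List Char) {i : Int} {t : String}
    (hsw : pvStartsAt low i t = true) : PySem.Chars.isIn t.toList low = true := by
  refine (PySem.Chars.exists_prefix_drop_iff_isIn _ _).mp ⟨i.toNat, ?_⟩
  exact (PySem.Chars.startswith_iff _ _).mp hsw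

-- a token occurring in low starts at some scanned position
theorem pvExists_startsAt (low : List Char) {t : String} (ht : t.toList ≠ [])
    (hin : PySem.Chars.isIn t.toList low = true) :
    ∃ i ∈ PySem.List.pyRange 0 (low.length : Int) 1, pvStartsAt low i t = true := by
  obtain ⟨j, hj⟩ := (PySem.Chars.exists_prefix_drop_iff_isIn _ _).mpr hin
  have hjlt : j < low.length := by
    by_contra hge
    have : low.drop j = [] := List.drop_eq_nil_of_le (by omega)
    rw [this] at hj
    exact ht (List.prefix_nil.mp hj)
  refine ⟨(j : Int), ?_, ?_⟩
  · rw [PySem.List.mem_pyRange_one]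
    constructor <;> [positivity; exact_mod_cast hjlt]
  · simpa [pvStartsAt, PySem.Chars.startswith_iff] using hj


-- bounds on the scan's final best, phrased via membership of tokens in low
theorem pvBest_le (low : List Char) {t : String} {p : Int}
    (hmem : (t, p) ∈ pvTokenPriority) (hin : PySem.Chars.isIn t.toList low = true) :
    (PySem.List.pyRange 0 (low.length : Int) 1).foldl (fun best i => pvScanAt low i best) 6 ≤ p := by
  have ht : t.toList ≠ [] := by fin_cases hmem <;> decide
  obtain ⟨i, hi, hs⟩ := pvExists_startsAt low ht hin
  exact pvOuter_le_of_match low _ 6 hi hmem hs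

theorem pvBest_ge (low : List Char) (k : Int) (hk : k ≤ 6)
    (h : ∀ t p, (t, p) ∈ pvTokenPriority → p < k → PySem.Chars.isIn t.toList low = false) :
    k ≤ (PySem.List.pyRange 0 (low.length : Int) 1).foldl (fun best i => pvScanAt low i best) 6 := by
  refine pvOuter_ge low _ 6 k hk ?_
  intro i _ t p hm hs
  by_contra hlt
  rw [Int.not_le] at hlt
  have hin := pvIsIn_of_startsAt low hs
  rw [h t p hm hlt] at hin
  cases hin

-- ===== VERDICT (by name: the statement is the Claim_ definition above) =====
theorem responsibility_for_py_spec : Claim_equal_responsibility_for_py := by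
  intro name _
  show responsibility_for_py name = responsibility_for_py_alt name
  unfold responsibility_for_py responsibility_for_py_alt
  simp only [PySem.Str.isIn_eq, PySem.Str.len_eq, PySem.Str.toList_lower,
    List.any_cons, List.any_nil, Bool.or_false]
  generalize PySem.Chars.lower name.toList = l
  split_ifs with h1 h2 h3 h4 h5 h6
  · simp only [Bool.or_eq_true] at h1
    rcases h1 with hg | hg
    · rw [le_antisymm (pvBest_le l (t := "gateway") (p := 0) (by decide) hg)
        (pvBest_ge l 0 (by norm_num) (fun t p hm hp => by fin_cases hm <;> omega))]
      decide
    · rw [le_antisymm (pvBest_le l (t := "ingress") (p := 0) (by decide) hg)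
        (pvBest_ge l 0 (by norm_num) (fun t p hm hp => by fin_cases hm <;> omega))]
      decide
  · simp only [Bool.or_eq_true, not_or, Bool.not_eq_true] at h1
    rw [le_antisymm (pvBest_le l (t := "auth") (p := 1) (by decide) h2)
      (pvBest_ge l 1 (by norm_num) (fun t p hm hp => by
        fin_cases hm <;> first | omega | simp_all))]
    decide
  · simp only [Bool.or_eq_true, not_or, Bool.not_eq_true] at h1 h2
    simp only [Bool.or_eq_true] at h3
    rcases h3 with hg | hg | hg | hg | hg | hg | hg
    all_goals
      first
      | (rw [le_antisymm (pvBest_le l (p := 2) (by decide) hg)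
            (pvBest_ge l 2 (by norm_num) (fun t p hm hp => by
              fin_cases hm <;> first | omega | simp_all))]
         decide)
  · simp only [Bool.or_eq_true, not_or, Bool.not_eq_true] at h1 h2 h3
    simp only [Bool.or_eq_true] at h4
    rcases h4 with hg | hg | hg
    all_goals
      first
      | (rw [le_antisymm (pvBest_le l (p := 3) (by decide) hg)
            (pvBest_ge l 3 (by norm_num) (fun t p hm hp => by
              fin_cases hm <;> first | omega | simp_all))]
         decide)
  · simp only [Bool.or_eq_true, not_or, Bool.not_eq_true] at h1 h2 h3 h4
    simp only [Bool.or_eq_true] at h5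
    rcases h5 with hg | hg | hg | hg | hg | hg
    all_goals
      first
      | (rw [le_antisymm (pvBest_le l (p := 4) (by decide) hg)
            (pvBest_ge l 4 (by norm_num) (fun t p hm hp => by
              fin_cases hm <;> first | omega | simp_all))]
         decide)
  · simp only [Bool.or_eq_true, not_or, Bool.not_eq_true] at h1 h2 h3 h4 h5
    simp only [Bool.or_eq_true] at h6
    rcases h6 with hg | hg | hg
    all_goals
      first
      | (rw [le_antisymm (pvBest_le l (p := 5) (by decide) hg)
            (pvBest_ge l 5 (by norm_num) (fun t p hm hp => by
              fin_cases hm <;> first | omega | simp_all))]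
         decide)
  · simp only [Bool.or_eq_true, not_or, Bool.not_eq_true] at h1 h2 h3 h4 h5 h6
    rw [le_antisymm (pvOuter_le l _ 6)
      (pvBest_ge l 6 (by norm_num) (fun t p hm hp => by
        fin_cases hm <;> first | omega | simp_all))]
    decide
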